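-- pv_equiv track=rewrite | github.com/programaker-project/Programaker-Core | utils/testing/gen_test_api_plan.py | merge_requirements
-- ===== SOURCE A (Python) =====
-- def merge_requirements(g1, g2):
--     requirements = {}
--     for (req, prop) in g1:
--         if req not in requirements:
--             requirements[req] = prop
--         elif requirements[req] == prop:
--             requirements[req] = None
--     for (req, prop) in g2:
--         if req not in requirements:
--             requirements[req] = prop
--         elif requirements[req] == prop:
--             requirements[req] = None
--     return list(requirements.items())
-- ===== SOURCE B (Python) =====
-- from itertools import chain
--
--
-- def merge_requirements(g1, g2):
--     # Pass 1: group all props by requirement, preserving first-seen key order.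
--     groups = {}
--     for (req, prop) in chain(g1, g2):
--         groups.setdefault(req, []).append(prop)
--     # Pass 2: reduce each group: start with the first prop, latch to None on a match.
--     result = []
--     for req, props in groups.items():
--         val = props[0]
--         for p in props[1:]:
--             if val == p:
--                 val = None
--         result.append((req, val))
--     return result
-- ===== Notes on version B (the rewrite author's own statement) =====
-- stated objective: alternative
-- what changed: Replaces A's single stateful streaming update of a req->value dict by a build-index-then-reduce shape: one pass groups all props per requirement into ordered lists, a second pass folds each list with the same None-latching rule.
import Mathlib
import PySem

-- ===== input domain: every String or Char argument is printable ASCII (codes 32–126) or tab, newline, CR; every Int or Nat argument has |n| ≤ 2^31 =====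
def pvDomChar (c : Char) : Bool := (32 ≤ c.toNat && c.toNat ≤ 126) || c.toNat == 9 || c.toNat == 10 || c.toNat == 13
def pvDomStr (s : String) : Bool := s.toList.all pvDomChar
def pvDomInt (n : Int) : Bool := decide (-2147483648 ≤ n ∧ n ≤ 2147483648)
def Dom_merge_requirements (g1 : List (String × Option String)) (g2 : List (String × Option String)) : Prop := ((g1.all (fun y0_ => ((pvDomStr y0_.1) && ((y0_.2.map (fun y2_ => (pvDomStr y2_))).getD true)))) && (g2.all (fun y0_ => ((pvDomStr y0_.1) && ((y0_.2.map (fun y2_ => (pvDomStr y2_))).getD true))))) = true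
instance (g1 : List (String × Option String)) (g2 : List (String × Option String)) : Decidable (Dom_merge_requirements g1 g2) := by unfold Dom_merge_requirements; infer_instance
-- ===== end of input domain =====

-- B replaces A's single stateful streaming dict update by a build-index-then-reduce decomposition
-- (group all props per requirement first, then fold each list); alternative, same cost.

-- ===== PORT A =====
-- one iteration of A's loop body (identical for both loops in A)
def mrStep (d : PySem.Dict String (Option String)) (rp : String × Option String) :
    PySem.Dict String (Option String) :=
  if d.contains rp.1 = false then d.insert rp.1 rp.2
  else if d.get? rp.1 == some rp.2 then d.insert rp.1 none
  else d

def merge_requirements (g1 : List (String × Option String)) (g2 : List (String × Option String)) : List (String × Option String) :=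
  let requirements := g1.foldl mrStep PySem.Dict.empty
  let requirements := g2.foldl mrStep requirements
  requirements.items

-- ===== PORT B =====
-- groups.setdefault(req, []).append(prop)
def mrGroupStep (d : PySem.Dict String (List (Option String))) (rp : String × Option String) :
    PySem.Dict String (List (Option String)) :=
  d.modify rp.1 [] (fun l => l ++ [rp.2])

-- val = props[0]; for p in props[1:]: if val == p: val = None
def mrReduce (props : List (Option String)) : Option String :=
  match props with
  | [] => none
  | p :: ps => ps.foldl (fun v q => if v == q then none else v) p

def merge_requirements_alt (g1 : List (String × Option String)) (g2 : List (String × Option String)) : List (String × Option String) :=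
  let groups := (g1 ++ g2).foldl mrGroupStep PySem.Dict.empty
  groups.items.map (fun kv => (kv.1, mrReduce kv.2))

-- ===== PRECONDITION & SPEC =====
def Spec_merge_requirements (g1 : List (String × Option String)) (g2 : List (String × Option String)) (out : List (String × Option String)) : Prop := out = merge_requirements_alt g1 g2
instance (g1 : List (String × Option String)) (g2 : List (String × Option String)) (out : List (String × Option String)) : Decidable (Spec_merge_requirements g1 g2 out) := by unfold Spec_merge_requirements; infer_instance

-- ===== CLAIM (what is proved, stated in full; the proofs are below) =====
def Claim_equal_merge_requirements : Prop := ∀ (g1 : List (String × Option String)) (g2 : List (String × Option String)), Dom_merge_requirements g1 g2 → Spec_merge_requirements g1 g2 (merge_requirements g1 g2)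

-- ===== LEMMAS AND PROOFS =====

lemma mrReduce_append (ps : List (Option String)) (q : Option String) (h : ps ≠ []) :
    mrReduce (ps ++ [q]) = if mrReduce ps == q then none else mrReduce ps := by
  cases ps with
  | nil => exact absurd rfl h
  | cons p t => simp [mrReduce, List.foldl_append]

-- the loop invariant linking A's value dict to B's group dict
def mrRel (d : PySem.Dict String (Option String)) (gd : PySem.Dict String (List (Option String))) : Prop :=
  d.items = gd.items.map (fun kv => (kv.1, mrReduce kv.2)) ∧ gd.keys.Nodup ∧ ∀ kv ∈ gd.items, kv.2 ≠ []

lemma mrRel_keys {d gd} (h : mrRel d gd) : d.keys = gd.keys := by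
  obtain ⟨h1, -, -⟩ := h
  simp only [PySem.Dict.keys, h1, List.map_map]
  rfl

lemma mrRel_step {d gd} (rp : String × Option String) (h : mrRel d gd) :
    mrRel (mrStep d rp) (mrGroupStep gd rp) := by
  obtain ⟨h1, h2, h3⟩ := h
  have hkeys : d.keys = gd.keys := mrRel_keys ⟨h1, h2, h3⟩
  have hdnd : d.keys.Nodup := hkeys ▸ h2
  have hcont : d.contains rp.1 = gd.contains rp.1 := by
    rw [PySem.Dict.contains_eq_decide_mem_keys, PySem.Dict.contains_eq_decide_mem_keys, hkeys]
  by_cases hc : gd.contains rp.1 = true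
  · -- key already present
    obtain ⟨ps, hps⟩ : ∃ ps, gd.get? rp.1 = some ps := by
      have := PySem.Dict.contains_eq_isSome_get? (d := gd) (k := rp.1)
      rw [hc] at this
      exact Option.isSome_iff_exists.mp this.symm
    have hmem : (rp.1, ps) ∈ gd.items := PySem.Dict.mem_items_of_get?_eq_some gd hps
    have hpsne : ps ≠ [] := h3 _ hmem
    have hdget : d.get? rp.1 = some (mrReduce ps) := by
      refine PySem.Dict.get?_of_mem_items d ?_ hdnd
      rw [h1]
      exact List.mem_map.mpr ⟨(rp.1, ps), hmem, rfl⟩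
    have hgd' : mrGroupStep gd rp = gd.insert rp.1 (ps ++ [rp.2]) := by
      show gd.insert rp.1 ((gd.getD rp.1 []) ++ [rp.2]) = _
      rw [PySem.Dict.getD_of_get?_eq_some gd [] hps]
    have hitems' : (mrGroupStep gd rp).items
        = gd.items.map (fun p => if p.1 == rp.1 then (rp.1, ps ++ [rp.2]) else p) := by
      rw [hgd', PySem.Dict.items_insert_of_contains gd _ hc]
    refine ⟨?_, ?_, ?_⟩
    · -- items relation
      rw [hitems', List.map_map]
      unfold mrStep
      rw [hcont, hc, hdget]
      rw [if_neg (by decide : ¬ (true = false))]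
      by_cases heq : mrReduce ps = rp.2
      · rw [if_pos (by simp [heq])]
        rw [PySem.Dict.items_insert_of_contains d _ (hcont.trans hc), h1, List.map_map]
        apply List.map_congr_left
        intro p hp
        by_cases hk : p.1 = rp.1 <;>
          simp [Function.comp, hk, mrReduce_append ps rp.2 hpsne, heq]
      · rw [if_neg (by simp [heq])]
        rw [h1]
        apply List.map_congr_left
        intro p hp
        by_cases hk : p.1 = rp.1
        · have : gd.get? p.1 = some p.2 := PySem.Dict.get?_of_mem_items gd hp h2
          rw [hk, hps] at this
          have hp2 : p.2 = ps := by injection this with h'; exact h'.symm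
          simp [Function.comp, hk, hp2, mrReduce_append ps rp.2 hpsne, heq]
        · simp [Function.comp, hk]
    · -- keys stay nodup
      rw [hgd', PySem.Dict.keys_insert_of_contains gd _ hc]
      exact h2
    · -- all group lists stay nonempty
      intro kv hkv
      rw [hitems'] at hkv
      obtain ⟨p, hp, hpe⟩ := List.mem_map.mp hkv
      by_cases hk : p.1 == rp.1
      · rw [if_pos hk] at hpe; simp [← hpe]
      · rw [if_neg hk] at hpe; exact hpe ▸ h3 p hp
  · -- fresh key
    have hc' : gd.contains rp.1 = false := by
      cases hcg : gd.contains rp.1 with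
      | true => exact absurd hcg hc
      | false => rfl
    have hdc : d.contains rp.1 = false := hcont.trans hc'
    have hgd' : mrGroupStep gd rp = gd.insert rp.1 [rp.2] := by
      show gd.insert rp.1 ((gd.getD rp.1 []) ++ [rp.2]) = _
      rw [PySem.Dict.getD_of_not_contains gd [] hc']
      rfl
    refine ⟨?_, ?_, ?_⟩
    · unfold mrStep
      rw [hdc, if_pos rfl, hgd',
        PySem.Dict.items_insert_of_not_contains d _ hdc,
        PySem.Dict.items_insert_of_not_contains gd _ hc', List.map_append, h1]
      rfl
    · rw [hgd', PySem.Dict.keys_insert_of_not_contains gd _ hc']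
      refine List.Nodup.append h2 (List.nodup_singleton _) ?_
      intro a ha hb
      rw [List.mem_singleton] at hb
      subst hb
      rw [PySem.Dict.contains_eq_decide_mem_keys] at hc'
      simp at hc'
      exact hc' ha
    · intro kv hkv
      rw [hgd', PySem.Dict.items_insert_of_not_contains gd _ hc'] at hkv
      rcases List.mem_append.mp hkv with hkv | hkv
      · exact h3 _ hkv
      · rw [List.mem_singleton] at hkv; subst hkv; simp

lemma mrRel_foldl (l : List (String × Option String)) {d gd} (h : mrRel d gd) :
    mrRel (l.foldl mrStep d) (l.foldl mrGroupStep gd) := by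
  induction l generalizing d gd with
  | nil => exact h
  | cons rp t ih => exact ih (mrRel_step rp h)

lemma mrRel_empty : mrRel PySem.Dict.empty PySem.Dict.empty :=
  ⟨rfl, List.nodup_nil, by intro kv hkv; simp [PySem.Dict.empty] at hkv⟩

-- ===== VERDICT (by name: the statement is the Claim_ definition above) =====
theorem merge_requirements_spec : Claim_equal_merge_requirements := by
  intro g1 g2 _
  unfold Spec_merge_requirements merge_requirements merge_requirements_alt
  show (List.foldl mrStep (List.foldl mrStep PySem.Dict.empty g1) g2).items
      = List.map (fun kv => (kv.1, mrReduce kv.2)) (List.foldl mrGroupStep PySem.Dict.empty (g1 ++ g2)).items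
  rw [← List.foldl_append]
  exact (mrRel_foldl (g1 ++ g2) mrRel_empty).1
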